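-- pv_equiv track=rewrite | github.com/tagore8661/accenture-coding-practice | Previous-Coding-Questions/Question-12.py | find_best_rhyme
-- ===== SOURCE A (Python) =====
-- def find_best_rhyme(S, D, N):
--     best_match = None
--     max_suffix_length = 0
--
--     for word in D:
--         if word == S:
--             continue  # Skip if the word is exactly the same as S
--
--         # Find the longest matching suffix
--         suffix_length = 0
--         min_len = min(len(S), len(word))
--
--         for i in range(1, min_len + 1):
--             if S[-i] == word[-i]:
--                 suffix_length += 1
--             else:
--                 break
--
--         # Update the best match if this word has a longer matching suffix
--         if suffix_length > max_suffix_length: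
--             best_match = word
--             max_suffix_length = suffix_length
--
--     # If no match found, return "No Word"
--     if best_match is None:
--         return "No Word"
--
--     return best_match
-- ===== SOURCE B (Python) =====
-- def find_best_rhyme(S, D, N):
--     # Search suffix lengths from longest to shortest; the first word that
--     # ends with the length-k suffix of S is A's answer (earliest achiever
--     # of the maximal common-suffix length).
--     for k in range(len(S), 0, -1):
--         suf = S[-k:]
--         for w in D:
--             if w != S and w.endswith(suf):
--                 return w
--     return "No Word"
-- ===== Notes on version B (the rewrite author's own statement) =====
-- stated objective: alternative
-- what changed: Replaces A's per-word suffix-measuring inner loop plus running-max update by a search over suffix lengths in descending order: for each k from len(S) down to 1, return the first word (not equal to S) that endswith S[-k:]; correctness holds because the first k at which any word qualifies is exactly the maximal common-suffix length and the first qualifying word is A's earliest achiever.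
import Mathlib
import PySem

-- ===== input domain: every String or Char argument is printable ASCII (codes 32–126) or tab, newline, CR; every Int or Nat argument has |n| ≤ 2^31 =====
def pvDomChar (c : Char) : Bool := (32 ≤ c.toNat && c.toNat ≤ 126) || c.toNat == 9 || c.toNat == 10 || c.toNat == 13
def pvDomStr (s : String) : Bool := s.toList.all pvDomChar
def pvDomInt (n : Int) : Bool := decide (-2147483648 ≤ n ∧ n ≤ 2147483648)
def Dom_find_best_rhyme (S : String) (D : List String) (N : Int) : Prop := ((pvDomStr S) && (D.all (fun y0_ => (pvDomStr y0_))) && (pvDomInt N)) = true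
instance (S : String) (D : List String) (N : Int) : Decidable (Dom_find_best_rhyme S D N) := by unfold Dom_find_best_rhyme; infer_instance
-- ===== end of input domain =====

-- B replaces A's per-word suffix measurement and running-max update by a descending search
-- over suffix lengths k = len(S)..1, returning the first word ≠ S that ends with S[-k:]
-- (alternative algorithm; not claimed faster).

-- ===== PORT A =====
-- inner loop: for i in range(1, min_len+1): if S[-i] == word[-i]: suffix_length += 1 else: break
def pvSuffGo (S w : List Char) : List Int → Nat → Nat
  | [], acc => acc
  | i :: rest, acc =>
    if PySem.List.pyGet? S (-i) = PySem.List.pyGet? w (-i) then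
      pvSuffGo S w rest (acc + 1)
    else acc

def pvSuffLen (S w : String) : Nat :=
  pvSuffGo S.toList w.toList
    (PySem.List.pyRange 1 (min (PySem.Str.len S) (PySem.Str.len w) + 1) 1) 0

-- outer loop over D carrying (best_match, max_suffix_length)
def pvALoop (S : String) : List String → Option String → Nat → String
  | [], best, _ => match best with | none => "No Word" | some w => w
  | word :: rest, best, maxLen =>
    if word = S then pvALoop S rest best maxLen
    else
      let sl := pvSuffLen S word
      if sl > maxLen then pvALoop S rest (some word) sl
      else pvALoop S rest best maxLen

def find_best_rhyme (S : String) (D : List String) (N : Int) : String :=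
  pvALoop S D none 0

-- ===== PORT B =====
-- inner loop: for w in D: if w != S and w.endswith(suf): return w
def pvBInner (S suf : String) : List String → Option String
  | [] => none
  | w :: rest =>
    if w ≠ S ∧ PySem.Str.endswith w suf = true then some w else pvBInner S suf rest

-- outer loop: for k in range(len(S), 0, -1): suf = S[-k:]; …
def pvBOuter (S : String) (D : List String) : List Int → String
  | [] => "No Word"
  | k :: rest =>
    match pvBInner S (PySem.Str.slice S (some (-k)) none) D with
    | some w => w
    | none => pvBOuter S D rest

def find_best_rhyme_alt (S : String) (D : List String) (N : Int) : String :=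
  pvBOuter S D (PySem.List.pyRange (PySem.Str.len S) 0 (-1))

-- ===== PRECONDITION & SPEC =====
def Spec_find_best_rhyme (S : String) (D : List String) (N : Int) (out : String) : Prop := out = find_best_rhyme_alt S D N
instance (S : String) (D : List String) (N : Int) (out : String) : Decidable (Spec_find_best_rhyme S D N out) := by unfold Spec_find_best_rhyme; infer_instance

-- ===== CLAIM (what is proved, stated in full; the proofs are below) =====
def Claim_equal_find_best_rhyme : Prop := ∀ (S : String) (D : List String) (N : Int), Dom_find_best_rhyme S D N → Spec_find_best_rhyme S D N (find_best_rhyme S D N)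

-- ===== LEMMAS AND PROOFS =====

-- common leading run of two char lists; pvScore rs w = length of the common suffix (rs = reversed S)
def pvLead : List Char → List Char → Nat
  | a :: as, b :: bs => if a = b then pvLead as bs + 1 else 0
  | _, _ => 0

def pvScore (rs : List Char) (w : String) : Nat := pvLead rs w.toList.reverse

-- first word of the scored list whose score equals best (the canonical answer)
def pvPick (best : Nat) : List (Nat × String) → String
  | [] => "No Word"
  | (s, w) :: rest => if 0 < best ∧ s = best then w else pvPick best rest

lemma pvLead_right_nil (a : List Char) : pvLead a [] = 0 := by cases a <;> rfl

lemma pvLead_left_nil (b : List Char) : pvLead [] b = 0 := by cases b <;> rfl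

lemma pvLead_le_left : ∀ (a b : List Char), pvLead a b ≤ a.length := by
  intro a
  induction a with
  | nil => intro b; simp [pvLead_left_nil]
  | cons x as ih =>
    intro b
    cases b with
    | nil => simp [pvLead_right_nil]
    | cons y bs =>
      by_cases h : x = y
      · simpa [pvLead, h] using ih bs
      · simp [pvLead, h]

-- A's inner loop from index j+1 counts the common leading run of the reversed lists from position j
lemma pvSuffGo_eq_lead : ∀ (k j acc : Nat) (s t : List Char), j + k = min s.length t.length →
    pvSuffGo s t (PySem.List.pyRange ((j : Int) + 1) (((min s.length t.length : Nat) : Int) + 1) 1) acc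
      = acc + pvLead (s.reverse.drop j) (t.reverse.drop j) := by
  intro k
  induction k with
  | zero =>
    intro j acc s t h
    rw [PySem.List.pyRange_one_eq_nil (by push_cast; omega)]
    rcases le_total s.length t.length with hle | hle
    · rw [show s.reverse.drop j = [] from List.drop_eq_nil_of_le (by simp; omega),
        pvLead_left_nil]
      simp [pvSuffGo]
    · rw [show t.reverse.drop j = [] from List.drop_eq_nil_of_le (by simp; omega),
        pvLead_right_nil]
      simp [pvSuffGo]
  | succ k ih =>
    intro j acc s t h
    have hjs : j < s.length := by omega
    have hjt : j < t.length := by omega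
    have hjrs : j < s.reverse.length := by simpa using hjs
    have hjrt : j < t.reverse.length := by simpa using hjt
    have hcast : -((j : Int) + 1) = -(((j + 1 : Nat)) : Int) := by push_cast; ring
    rw [PySem.List.pyRange_one_cons (by push_cast; omega)]
    have hgs : PySem.List.pyGet? s (-((j : Int) + 1)) = s.reverse[j]? := by
      rw [hcast, PySem.List.pyGet?_neg_natCast s (j + 1) (by omega) (by omega),
        show s.length - (j + 1) = s.length - 1 - j from by omega,
        ← List.getElem?_reverse hjs]
    have hgt2 : PySem.List.pyGet? t (-((j : Int) + 1)) = t.reverse[j]? := by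
      rw [hcast, PySem.List.pyGet?_neg_natCast t (j + 1) (by omega) (by omega),
        show t.length - (j + 1) = t.length - 1 - j from by omega,
        ← List.getElem?_reverse hjt]
    have hrange : (j : Int) + 1 + 1 = ((j + 1 : Nat) : Int) + 1 := by push_cast; ring
    simp only [pvSuffGo]
    rw [List.drop_eq_getElem_cons hjrs, List.drop_eq_getElem_cons hjrt]
    by_cases hc : s.reverse[j]'hjrs = t.reverse[j]'hjrt
    · rw [if_pos (by rw [hgs, hgt2, List.getElem?_eq_getElem hjrs,
        List.getElem?_eq_getElem hjrt, hc]), hrange, ih (j + 1) (acc + 1) s t (by omega)]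
      simp only [pvLead, if_pos hc]
      omega
    · rw [if_neg (by rw [hgs, hgt2, List.getElem?_eq_getElem hjrs,
        List.getElem?_eq_getElem hjrt]; exact fun hco => hc (Option.some.inj hco))]
      have hc' : ¬s[s.length - 1 - j]'(by omega) = t[t.length - 1 - j]'(by omega) := by
        simpa [List.getElem_reverse] using hc
      simp [pvLead, hc']

lemma pvSuffLen_eq_score (S w : String) :
    pvSuffLen S w = pvScore S.toList.reverse w := by
  have h := pvSuffGo_eq_lead (min S.toList.length w.toList.length) 0 0 S.toList w.toList
    (by omega)
  unfold pvSuffLen pvScore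
  rw [PySem.Str.len_eq, PySem.Str.len_eq, ← Nat.cast_min]
  simpa using h

lemma foldl_max_init (l : List (Nat × String)) (a : Nat) :
    l.foldl (fun b p => max b p.1) a = max a (l.foldl (fun b p => max b p.1) 0) := by
  induction l generalizing a with
  | nil => simp
  | cons p l ih =>
    simp only [List.foldl_cons]
    rw [ih (max a p.1), ih (max 0 p.1)]
    omega

-- invariant of A's outer loop, phrased via pvPick
lemma pvALoop_char (S : String) : ∀ (rest : List String) (best : Option String) (maxLen : Nat),
    pvALoop S rest best maxLen =
      (if maxLen < ((rest.filter (fun w => w != S)).map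
            (fun w => (pvScore S.toList.reverse w, w))).foldl (fun b p => max b p.1) maxLen
       then pvPick (((rest.filter (fun w => w != S)).map
            (fun w => (pvScore S.toList.reverse w, w))).foldl (fun b p => max b p.1) maxLen)
          ((rest.filter (fun w => w != S)).map (fun w => (pvScore S.toList.reverse w, w)))
       else match best with | none => "No Word" | some w => w) := by
  intro rest
  induction rest with
  | nil => intro best maxLen; simp [pvALoop]
  | cons word rest ih =>
    intro best maxLen
    by_cases hw : word = S
    · rw [List.filter_cons_of_neg (by simpa using hw)]
      simp only [pvALoop, if_pos hw]
      exact ih best maxLen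
    · rw [List.filter_cons_of_pos (by simpa using hw)]
      simp only [pvALoop, if_neg hw, List.map_cons, List.foldl_cons,
        pvSuffLen_eq_score S word]
      set sc := pvScore S.toList.reverse word with hsc
      set scored := (rest.filter (fun w => w != S)).map
          (fun w => (pvScore S.toList.reverse w, w)) with hscored
      set M0 := scored.foldl (fun b p => max b p.1) 0 with hM0
      have hM : ∀ a : Nat, scored.foldl (fun b p => max b p.1) a = max a M0 :=
        fun a => foldl_max_init scored a
      by_cases hgt : maxLen < sc
      · rw [if_pos hgt, ih (some word) sc]
        simp only [hM]
        rw [show max maxLen sc = sc from by omega]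
        simp only [pvPick]
        by_cases hEq : sc = max sc M0
        · rw [if_neg (by omega), if_pos (by omega), if_pos (by constructor <;> omega)]
        · rw [if_pos (by omega), if_pos (by omega), if_neg (by
            rintro ⟨-, h2⟩; exact hEq h2)]
      · rw [if_neg hgt, ih best maxLen]
        simp only [hM]
        rw [show max maxLen sc = maxLen from by omega]
        by_cases h2 : maxLen < max maxLen M0
        · rw [if_pos h2, if_pos h2]
          simp only [pvPick]
          rw [if_neg (by rintro ⟨-, h3⟩; omega)]
        · rw [if_neg h2, if_neg h2]

-- k ≤ pvLead x y iff the first k elements of x are a prefix of y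
lemma take_prefix_iff_lead : ∀ (k : Nat) (x y : List Char), k ≤ x.length →
    (x.take k <+: y ↔ k ≤ pvLead x y) := by
  intro k
  induction k with
  | zero => intro x y _; simp
  | succ k ih =>
    intro x y hk
    cases x with
    | nil => simp at hk
    | cons c x' =>
      cases y with
      | nil =>
        rw [List.take_succ_cons, pvLead_right_nil]
        constructor
        · intro h; exact absurd (List.prefix_nil.mp h) (by simp)
        · omega
      | cons d y' =>
        rw [List.take_succ_cons, List.cons_prefix_cons]
        by_cases hc : c = d
        · subst hc
          have hl : pvLead (c :: x') (c :: y') = pvLead x' y' + 1 := by simp [pvLead]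
          rw [hl]
          constructor
          · rintro ⟨-, h⟩; have := (ih x' y' (by simpa using hk)).mp h; omega
          · intro h; exact ⟨rfl, (ih x' y' (by simpa using hk)).mpr (by omega)⟩
        · have hl : pvLead (c :: x') (d :: y') = 0 := by simp [pvLead, hc]
          rw [hl]
          constructor
          · rintro ⟨h, -⟩; exact absurd h hc
          · omega

-- w endswith S[-k:] iff k ≤ pvScore (rev S) w, for 1 ≤ k ≤ |S|
lemma endswith_iff_score (S w : String) (k : Nat) (h1 : 0 < k) (hk : k ≤ S.toList.length) :
    (PySem.Str.endswith w (PySem.Str.slice S (some (-(k : Int))) none) = true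
      ↔ k ≤ pvScore S.toList.reverse w) := by
  rw [PySem.Str.endswith_eq, PySem.Chars.endswith_iff, PySem.Str.toList_slice,
    PySem.Chars.slice_eq_listSlice, PySem.List.slice_from_neg_natCast S.toList k h1]
  rw [← List.reverse_prefix]
  have hd : (S.toList.drop (S.toList.length - k)).reverse = S.toList.reverse.take k := by
    rw [List.reverse_drop]
    congr 1
    omega
  rw [hd]
  exact take_prefix_iff_lead k S.toList.reverse w.toList.reverse (by simpa using hk)

lemma le_foldl_max (l : List (Nat × String)) (a : Nat) (p : Nat × String) (hp : p ∈ l) :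
    p.1 ≤ l.foldl (fun b q => max b q.1) a := by
  induction l generalizing a with
  | nil => simp at hp
  | cons q l ih =>
    rw [List.mem_cons] at hp
    rcases hp with rfl | h
    · rw [List.foldl_cons, foldl_max_init]
      omega
    · exact ih _ h

lemma foldl_max_mem (l : List (Nat × String)) :
    l.foldl (fun b q => max b q.1) 0 = 0 ∨
      ∃ p ∈ l, p.1 = l.foldl (fun b q => max b q.1) 0 := by
  induction l with
  | nil => left; rfl
  | cons q l ih =>
    rw [List.foldl_cons, foldl_max_init]
    rcases ih with h0 | ⟨p, hp, hq⟩
    · rcases Nat.eq_zero_or_pos q.1 with hq0 | hq0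
      · left; omega
      · right; exact ⟨q, by simp, by omega⟩
    · rcases le_total q.1 p.1 with hle | hle
      · right; exact ⟨p, by simp [hp], by omega⟩
      · right; exact ⟨q, by simp, by omega⟩

-- B's inner scan with the length-k suffix finds exactly pvPick k scored (when k bounds all scores)
lemma pvPick_no_match (k : Nat) : ∀ (l : List (Nat × String)),
    (∀ p ∈ l, p.1 ≠ k) → pvPick k l = "No Word" := by
  intro l
  induction l with
  | nil => intro _; rfl
  | cons q l ih =>
    intro hnone
    obtain ⟨s, w⟩ := q
    simp only [pvPick]
    rw [if_neg (by rintro ⟨-, h2⟩; exact hnone (s, w) List.mem_cons_self h2)]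
    exact ih (fun p hp => hnone p (List.mem_cons_of_mem _ hp))

lemma pvBInner_eq_pick (S : String) (k : Nat) (h1 : 0 < k) (hk : k ≤ S.toList.length) :
    ∀ (D : List String),
    (∀ w ∈ D, w ≠ S → pvScore S.toList.reverse w ≤ k) →
    pvBInner S (PySem.Str.slice S (some (-(k : Int))) none) D =
      (if pvPick k ((D.filter (fun w => w != S)).map
          (fun w => (pvScore S.toList.reverse w, w))) = "No Word" ∧
          ¬ (∃ w ∈ D, w ≠ S ∧ pvScore S.toList.reverse w = k)
        then none
        else some (pvPick k ((D.filter (fun w => w != S)).map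
          (fun w => (pvScore S.toList.reverse w, w))))) := by
  intro D
  induction D with
  | nil =>
    intro _
    simp [pvBInner, pvPick]
  | cons w D ih =>
    intro hAll
    have hAll' : ∀ w' ∈ D, w' ≠ S → pvScore S.toList.reverse w' ≤ k :=
      fun w' hw' => hAll w' (List.mem_cons_of_mem _ hw')
    by_cases hw : w = S
    · rw [List.filter_cons_of_neg (by simpa using hw)]
      simp only [pvBInner]
      rw [if_neg (fun h => h.1 hw), ih hAll']
      have hex : (∃ w' ∈ w :: D, w' ≠ S ∧ pvScore S.toList.reverse w' = k) ↔
          (∃ w' ∈ D, w' ≠ S ∧ pvScore S.toList.reverse w' = k) := by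
        constructor
        · rintro ⟨w', hw', hne, hs⟩
          rcases List.mem_cons.mp hw' with rfl | hmem
          · exact absurd hw hne
          · exact ⟨w', hmem, hne, hs⟩
        · rintro ⟨w', hw', hne, hs⟩
          exact ⟨w', List.mem_cons_of_mem _ hw', hne, hs⟩
      simp only [hex]
    · rw [List.filter_cons_of_pos (by simpa using hw), List.map_cons]
      have hend := endswith_iff_score S w k h1 hk
      by_cases hs : pvScore S.toList.reverse w = k
      · have hpick : pvPick k ((pvScore S.toList.reverse w, w) ::
            (D.filter (fun w => w != S)).map (fun w => (pvScore S.toList.reverse w, w))) = w := by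
          simp only [pvPick]
          rw [if_pos ⟨h1, hs⟩]
        simp only [pvBInner]
        rw [if_pos ⟨hw, hend.mpr (by omega)⟩, hpick]
        rw [if_neg (by
          rintro ⟨-, hno⟩
          exact hno ⟨w, List.mem_cons_self, hw, hs⟩)]
      · have hlt : pvScore S.toList.reverse w < k := by
          have := hAll w List.mem_cons_self hw
          omega
        have hpick : pvPick k ((pvScore S.toList.reverse w, w) ::
            (D.filter (fun w => w != S)).map (fun w => (pvScore S.toList.reverse w, w))) =
            pvPick k ((D.filter (fun w => w != S)).map
              (fun w => (pvScore S.toList.reverse w, w))) := by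
          simp only [pvPick]
          rw [if_neg (by rintro ⟨-, h2⟩; omega)]
        simp only [pvBInner]
        rw [if_neg (by
          rintro ⟨-, he⟩
          exact absurd (hend.mp he) (by omega)), ih hAll', hpick]
        have hex : (∃ w' ∈ w :: D, w' ≠ S ∧ pvScore S.toList.reverse w' = k) ↔
            (∃ w' ∈ D, w' ≠ S ∧ pvScore S.toList.reverse w' = k) := by
          constructor
          · rintro ⟨w', hw', hne, hs'⟩
            rcases List.mem_cons.mp hw' with rfl | hmem
            · exact absurd hs' hs
            · exact ⟨w', hmem, hne, hs'⟩
          · rintro ⟨w', hw', hne, hs'⟩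
            exact ⟨w', List.mem_cons_of_mem _ hw', hne, hs'⟩
        simp only [hex]

-- B's outer loop, from any m with M ≤ m ≤ |S|, computes the canonical answer
lemma pvBOuter_char (S : String) (D : List String) : ∀ (m : Nat), m ≤ S.toList.length →
    ((D.filter (fun w => w != S)).map
        (fun w => (pvScore S.toList.reverse w, w))).foldl (fun b p => max b p.1) 0 ≤ m →
    pvBOuter S D (PySem.List.pyRange (m : Int) 0 (-1)) =
      (if 0 < ((D.filter (fun w => w != S)).map
            (fun w => (pvScore S.toList.reverse w, w))).foldl (fun b p => max b p.1) 0
       then pvPick (((D.filter (fun w => w != S)).map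
            (fun w => (pvScore S.toList.reverse w, w))).foldl (fun b p => max b p.1) 0)
          ((D.filter (fun w => w != S)).map (fun w => (pvScore S.toList.reverse w, w)))
       else "No Word") := by
  intro m
  induction m with
  | zero =>
    intro _ hM
    rw [PySem.List.pyRange_neg_one_eq_nil (by norm_num)]
    simp only [pvBOuter]
    rw [if_neg (by omega)]
  | succ m ih =>
    intro hm hM
    set scored := (D.filter (fun w => w != S)).map
        (fun w => (pvScore S.toList.reverse w, w)) with hscored
    set M := scored.foldl (fun b p => max b p.1) 0 with hMdef
    have hallk : ∀ w ∈ D, w ≠ S → pvScore S.toList.reverse w ≤ m + 1 := by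
      intro w hwD hwne
      have hmem : (pvScore S.toList.reverse w, w) ∈ scored := by
        rw [hscored]
        exact List.mem_map_of_mem (List.mem_filter.mpr ⟨hwD, by simpa using hwne⟩)
      have := le_foldl_max scored 0 _ hmem
      omega
    rw [PySem.List.pyRange_neg_one_cons (by push_cast; omega),
      show ((m + 1 : Nat) : Int) - 1 = (m : Int) from by push_cast; ring]
    simp only [pvBOuter]
    rw [pvBInner_eq_pick S (m + 1) (by omega) (by omega) D hallk]
    by_cases hMk : M = m + 1
    · rcases foldl_max_mem scored with h0 | ⟨p, hp, hpv⟩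
      · omega
      · rw [hscored] at hp
        rcases List.mem_map.mp hp with ⟨w, hwmem, hpw⟩
        have hwD : w ∈ D := (List.mem_filter.mp hwmem).1
        have hwne : w ≠ S := by
          have := (List.mem_filter.mp hwmem).2
          simpa using this
        have hex : ∃ w' ∈ D, w' ≠ S ∧ pvScore S.toList.reverse w' = m + 1 := by
          refine ⟨w, hwD, hwne, ?_⟩
          have : p.1 = pvScore S.toList.reverse w := by rw [← hpw]
          omega
        rw [if_neg (by rintro ⟨-, hno⟩; exact hno hex), if_pos (by omega), hMk]
    · have hMle : M ≤ m := by omega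
      have hnone : ∀ p ∈ scored, p.1 ≠ m + 1 := by
        intro p hp
        have := le_foldl_max scored 0 p hp
        omega
      have hpick : pvPick (m + 1) scored = "No Word" := pvPick_no_match (m + 1) scored hnone
      have hnoex : ¬ ∃ w ∈ D, w ≠ S ∧ pvScore S.toList.reverse w = m + 1 := by
        rintro ⟨w, hwD, hwne, hsc⟩
        have hmem : (pvScore S.toList.reverse w, w) ∈ scored := by
          rw [hscored]
          exact List.mem_map_of_mem (List.mem_filter.mpr ⟨hwD, by simpa using hwne⟩)
        exact hnone _ hmem hsc
      rw [if_pos ⟨hpick, hnoex⟩]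
      exact ih (by omega) hMle

-- ===== VERDICT (by name: the statement is the Claim_ definition above) =====
theorem find_best_rhyme_spec : Claim_equal_find_best_rhyme := by
  intro S D N _
  show find_best_rhyme S D N = find_best_rhyme_alt S D N
  simp only [find_best_rhyme, find_best_rhyme_alt]
  set scored := (D.filter (fun w => w != S)).map
      (fun w => (pvScore S.toList.reverse w, w)) with hscored
  have hMle : scored.foldl (fun b p => max b p.1) 0 ≤ S.toList.length := by
    rcases foldl_max_mem scored with h0 | ⟨p, hp, hpv⟩
    · omega
    · rw [hscored] at hp
      rcases List.mem_map.mp hp with ⟨w, _, hpw⟩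
      have hpw1 : p.1 = pvScore S.toList.reverse w := by rw [← hpw]
      have h2 : pvScore S.toList.reverse w ≤ S.toList.reverse.length :=
        pvLead_le_left _ _
      simp only [List.length_reverse] at h2
      omega
  rw [pvALoop_char S D none 0, PySem.Str.len_eq,
    show ((S.toList.length : Int)) = ((S.toList.length : Nat) : Int) from rfl,
    pvBOuter_char S D S.toList.length (le_refl _) hMle]
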